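-- pv_equiv track=rewrite | github.com/rhgrant10/advent-of-code_python | aoc/problems/spinlock.py | fake_perform
-- ===== SOURCE A (Python) =====
-- def fake_perform(step_count, step_size):
--     index = 0
--     answer = 0
--     for i in range(1, step_count):
--         index = (index + step_size + 1) % i
--         if index == 0:
--             answer = i
--     return answer
-- ===== SOURCE B (Python) =====
-- def fake_perform(step_count, step_size):
--     # Batch-skips runs of non-wrapping steps arithmetically; same result as the plain per-step scan.
--     s1 = step_size + 1
--     index = 0
--     answer = 0
--     i = 1
--     while i < step_count:
--         index = (index + s1) % i
--         if index == 0: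
--             answer = i
--         i += 1
--         if s1 > 1 and index != 0 and i < step_count:
--             # while index + s1 < current step j, the modulo is a no-op and no wrap occurs
--             m = (i - index - 2) // (s1 - 1)
--             if m > step_count - i:
--                 m = step_count - i
--             if m > 0:
--                 index += m * s1
--                 i += m
--     return answer
-- ===== Notes on version B (the rewrite author's own statement) =====
-- stated objective: alternative
-- what changed: Instead of simulating every step of range(1, step_count), B arithmetically computes how many upcoming steps cannot wrap (the modulo is a no-op there) and skips them in one jump, touching only wrap-adjacent steps; for step_size <= 0 or huge step_size it degenerates to per-step processing.
import Mathlib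
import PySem

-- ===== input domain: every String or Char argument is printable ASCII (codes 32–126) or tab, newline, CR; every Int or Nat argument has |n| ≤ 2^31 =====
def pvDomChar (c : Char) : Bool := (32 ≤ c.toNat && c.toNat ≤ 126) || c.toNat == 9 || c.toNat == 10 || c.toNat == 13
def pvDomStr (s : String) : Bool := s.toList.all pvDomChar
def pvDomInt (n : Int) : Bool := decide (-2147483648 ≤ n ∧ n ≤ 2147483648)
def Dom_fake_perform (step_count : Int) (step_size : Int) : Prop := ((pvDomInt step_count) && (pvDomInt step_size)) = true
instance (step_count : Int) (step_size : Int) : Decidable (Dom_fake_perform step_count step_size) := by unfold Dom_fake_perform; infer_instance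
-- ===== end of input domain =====

-- B batch-skips runs of non-wrapping steps arithmetically instead of simulating every step (same return value for all inputs).

-- ===== PORT A =====
def fake_perform (step_count : Int) (step_size : Int) : Int :=
  ((PySem.List.pyRange 1 step_count 1).foldl
    (fun (st : Int × Int) (i : Int) =>
      let index := PySem.Int.mod (st.1 + step_size + 1) i
      (index, if index = 0 then i else st.2))
    (0, 0)).2

-- ===== PORT B =====
-- batch size: how many upcoming steps are guaranteed not to wrap (Source B's m computation)
def fakePerformBatch (step_count s1 i1 index' : Int) : Int :=
  let m0 := PySem.Int.floordiv (i1 - index' - 2) (s1 - 1)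
  if m0 > step_count - i1 then step_count - i1 else m0

-- transliteration of Source B's while-loop with arithmetic batch skipping
def fakePerformLoopB (step_count s1 : Int) (i index answer : Int) : Int :=
  if _h : i < step_count then
    if s1 > 1 ∧ PySem.Int.mod (index + s1) i ≠ 0 ∧ i + 1 < step_count then
      if _hm : fakePerformBatch step_count s1 (i + 1) (PySem.Int.mod (index + s1) i) > 0 then
        fakePerformLoopB step_count s1
          (i + 1 + fakePerformBatch step_count s1 (i + 1) (PySem.Int.mod (index + s1) i))
          (PySem.Int.mod (index + s1) i
            + fakePerformBatch step_count s1 (i + 1) (PySem.Int.mod (index + s1) i) * s1)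
          (if PySem.Int.mod (index + s1) i = 0 then i else answer)
      else
        fakePerformLoopB step_count s1 (i + 1) (PySem.Int.mod (index + s1) i)
          (if PySem.Int.mod (index + s1) i = 0 then i else answer)
    else
      fakePerformLoopB step_count s1 (i + 1) (PySem.Int.mod (index + s1) i)
        (if PySem.Int.mod (index + s1) i = 0 then i else answer)
  else answer
termination_by (step_count - i).toNat
decreasing_by all_goals omega

def fake_perform_alt (step_count : Int) (step_size : Int) : Int :=
  fakePerformLoopB step_count (step_size + 1) 1 0 0

-- ===== PRECONDITION & SPEC =====
def Spec_fake_perform (step_count : Int) (step_size : Int) (out : Int) : Prop := out = fake_perform_alt step_count step_size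
instance (step_count : Int) (step_size : Int) (out : Int) : Decidable (Spec_fake_perform step_count step_size out) := by unfold Spec_fake_perform; infer_instance

-- ===== CLAIM (what is proved, stated in full; the proofs are below) =====
def Claim_equal_fake_perform : Prop := ∀ (step_count : Int) (step_size : Int), Dom_fake_perform step_count step_size → Spec_fake_perform step_count step_size (fake_perform step_count step_size)

-- ===== LEMMAS AND PROOFS =====

-- step-by-step form of A's loop, used only in the proofs
def fakePerformLoopA (stop s1 : Int) (i index answer : Int) : Int :=
  if i < stop then
    fakePerformLoopA stop s1 (i + 1) (PySem.Int.mod (index + s1) i)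
      (if PySem.Int.mod (index + s1) i = 0 then i else answer)
  else answer
termination_by (stop - i).toNat
decreasing_by omega

theorem loopA_unfold (stop s1 i index answer : Int) (h : i < stop) :
    fakePerformLoopA stop s1 i index answer =
      fakePerformLoopA stop s1 (i + 1) (PySem.Int.mod (index + s1) i)
        (if PySem.Int.mod (index + s1) i = 0 then i else answer) := by
  rw [fakePerformLoopA]; simp [h]

theorem loopA_stop (stop s1 i index answer : Int) (h : ¬ i < stop) :
    fakePerformLoopA stop s1 i index answer = answer := by
  rw [fakePerformLoopA]; simp [h]

theorem fake_perform_eq_loopA (step_count step_size : Int) :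
    fake_perform step_count step_size =
      fakePerformLoopA step_count (step_size + 1) 1 0 0 := by
  unfold fake_perform
  suffices h : ∀ (n : Nat) (i idx ans : Int), (step_count - i).toNat = n →
      ((PySem.List.pyRange i step_count 1).foldl
        (fun (st : Int × Int) (j : Int) =>
          let index := PySem.Int.mod (st.1 + step_size + 1) j
          (index, if index = 0 then j else st.2))
        (idx, ans)).2 = fakePerformLoopA step_count (step_size + 1) i idx ans by
    exact h (step_count - 1).toNat 1 0 0 rfl
  intro n
  induction n with
  | zero =>
    intro i idx ans hn
    have hle : step_count ≤ i := by omega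
    rw [PySem.List.pyRange_one_eq_nil hle, loopA_stop _ _ _ _ _ (by omega)]
    rfl
  | succ n ih =>
    intro i idx ans hn
    have hlt : i < step_count := by omega
    rw [PySem.List.pyRange_one_cons hlt, loopA_unfold _ _ _ _ _ hlt]
    simp only [List.foldl_cons]
    have := ih (i + 1) (PySem.Int.mod (idx + step_size + 1) i)
      (if PySem.Int.mod (idx + step_size + 1) i = 0 then i else ans) (by omega)
    simpa [add_assoc] using this

-- skipping m non-wrapping steps leaves loopA's answer unchanged and just adds m*s1 to the index
theorem loopA_skip (stop s1 : Int) (hs1 : 2 ≤ s1) (m : Nat) :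
    ∀ (i idx ans : Int), 0 ≤ idx →
      (∀ t : Nat, t < m → idx + ((t : Int) + 1) * s1 < i + t) →
      i + m ≤ stop →
      fakePerformLoopA stop s1 i idx ans =
        fakePerformLoopA stop s1 (i + m) (idx + m * s1) ans := by
  induction m with
  | zero => intro i idx ans _ _ _; simp
  | succ m ih =>
    intro i idx ans hidx hcond hle
    have h0 : idx + (0 + 1 : Int) * s1 < i + (0 : Nat) := hcond 0 (Nat.succ_pos m)
    have hlt : idx + s1 < i := by push_cast at h0; omega
    have hpos : 0 < idx + s1 := by omega
    have hipos : 0 < i := by omega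
    have hmod : PySem.Int.mod (idx + s1) i = idx + s1 := by
      rw [PySem.Int.mod_eq_emod_of_pos hipos]
      exact Int.emod_eq_of_lt (by omega) hlt
    have hi_lt : i < stop := by push_cast at hle ⊢; omega
    rw [loopA_unfold _ _ _ _ _ hi_lt, hmod, if_neg (by omega)]
    have hrec := ih (i + 1) (idx + s1) ans (by omega)
      (by
        intro t ht
        have h2 := hcond (t + 1) (by omega)
        push_cast at h2 ⊢
        nlinarith)
      (by push_cast at hle ⊢; omega)
    rw [hrec]
    congr 1 <;> push_cast <;> ring
-- characterisation: B's batched loop computes the same as the plain loop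
theorem loopB_eq_loopA (stop s1 : Int) :
    ∀ (n : Nat) (i idx ans : Int), (stop - i).toNat = n → 0 < i → 0 ≤ idx →
      fakePerformLoopB stop s1 i idx ans = fakePerformLoopA stop s1 i idx ans := by
  intro n
  induction n using Nat.strong_induction_on with
  | _ n ih =>
    intro i idx ans hn hi hidx
    by_cases h : i < stop
    · rw [fakePerformLoopB, loopA_unfold _ _ _ _ _ h]
      simp only [dif_pos h]
      set index' := PySem.Int.mod (idx + s1) i with hidef
      have hidx' : 0 ≤ index' := by
        rw [hidef, PySem.Int.mod_eq_emod_of_pos hi]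
        exact Int.emod_nonneg _ (by omega)
      set answer' := if index' = 0 then i else ans with hadef
      by_cases hb : s1 > 1 ∧ index' ≠ 0 ∧ i + 1 < stop
      · rw [if_pos hb]
        obtain ⟨hs1, hne, hi1⟩ := hb
        set m := fakePerformBatch stop s1 (i + 1) index' with hm
        have hmval : m = (if PySem.Int.floordiv (i + 1 - index' - 2) (s1 - 1) > stop - (i + 1)
            then stop - (i + 1) else PySem.Int.floordiv (i + 1 - index' - 2) (s1 - 1)) := by
          rw [hm]; rfl
        by_cases hmp : m > 0
        · rw [dif_pos hmp]
          have hmle : m ≤ stop - (i + 1) := by rw [hmval]; split <;> omega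
          have hmq : m * (s1 - 1) ≤ i + 1 - index' - 2 := by
            have hm0' : m ≤ PySem.Int.floordiv (i + 1 - index' - 2) (s1 - 1) := by
              rw [hmval]; split <;> omega
            exact (PySem.Int.le_floordiv_iff_mul_le (a := i + 1 - index' - 2)
              (b := s1 - 1) (q := m) (by omega)).mp hm0'
          have hskip := loopA_skip stop s1 (by omega) m.toNat (i + 1) index' answer' hidx'
            (by
              intro t ht
              have htm : (t : Int) + 1 ≤ m := by omega
              have h1 : ((t : Int) + 1) * (s1 - 1) ≤ m * (s1 - 1) :=
                mul_le_mul_of_nonneg_right htm (by omega)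
              nlinarith)
            (by omega)
          rw [Int.toNat_of_nonneg (by omega)] at hskip
          rw [hskip]
          have : i + 1 + m = i + 1 + m := rfl
          exact ih (stop - (i + 1 + m)).toNat (by omega) _ _ _ rfl (by omega)
            (by have : 0 ≤ m * s1 := mul_nonneg (by omega) (by omega); omega)
        · rw [dif_neg hmp]
          exact ih (stop - (i + 1)).toNat (by omega) _ _ _ rfl (by omega) hidx'
      · rw [if_neg hb]
        exact ih (stop - (i + 1)).toNat (by omega) _ _ _ rfl (by omega) hidx'
    · rw [fakePerformLoopB, loopA_stop _ _ _ _ _ h]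
      simp [h]

-- ===== VERDICT (by name: the statement is the Claim_ definition above) =====
theorem fake_perform_spec : Claim_equal_fake_perform := by
  intro step_count step_size _
  unfold Spec_fake_perform fake_perform_alt
  rw [fake_perform_eq_loopA]
  exact (loopB_eq_loopA step_count (step_size + 1) (step_count - 1).toNat 1 0 0 rfl
    (by omega) (by omega)).symm
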